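-- pv_equiv track=rewrite | github.com/badanory/Phil_Robot-AI-Drummer | phil_robot/pipeline/command_validator.py | validate_sequence_rules
-- ===== SOURCE A (Python) =====
-- def validate_sequence_rules(commands):
--     """
--     현재는 강제 차단보다 경고 위주로 둔다.
--     planner가 도입되면 이 계층에서 더 적극적으로 시퀀스를 보정할 수 있다.
--     """
--     warnings = []
--
--     play_commands = [cmd for cmd in commands if cmd.startswith("p:")]
--     if play_commands and "r" not in commands:
--         warnings.append("play 명령이 준비 자세 없이 생성되었습니다. 현재는 로봇 측 기존 동작에 의존합니다.")
--
--     consecutive_moves = 0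
--     for command in commands:
--         if command.startswith("move:"):
--             consecutive_moves += 1
--         elif command.startswith("wait:"):
--             consecutive_moves = 0
--         else:
--             consecutive_moves = 0
--
--         if consecutive_moves >= 3:
--             warnings.append("move 명령이 연속으로 길게 이어집니다. 후속 planner 단계에서 wait 삽입을 고려하세요.")
--             break
--
--     return warnings
-- ===== SOURCE B (Python) =====
-- PLAY_WARN = "play 명령이 준비 자세 없이 생성되었습니다. 현재는 로봇 측 기존 동작에 의존합니다."
-- MOVE_WARN = "move 명령이 연속으로 길게 이어집니다. 후속 planner 단계에서 wait 삽입을 고려하세요."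
--
--
-- def validate_sequence_rules(commands):
--     warnings = []
--
--     if any(cmd.startswith("p:") for cmd in commands) and "r" not in commands:
--         warnings.append(PLAY_WARN)
--
--     # Scan maximal runs of move commands by index jumps instead of a stateful counter.
--     i, n = 0, len(commands)
--     while i < n:
--         if commands[i].startswith("move:"):
--             j = i
--             while j < n and commands[j].startswith("move:"):
--                 j += 1
--             if j - i >= 3:
--                 warnings.append(MOVE_WARN)
--                 break
--             i = j
--         else:
--             i += 1
--
--     return warnings
-- ===== Notes on version B (the rewrite author's own statement) =====
-- stated objective: simpler
-- what changed: Replaces the stateful consecutive-move counter threaded through an early-break loop by an index-jumping scan over maximal runs of move commands (and the filter-then-test play check by any()); one run of length >= 3 triggers the single warning.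
import Mathlib
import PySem

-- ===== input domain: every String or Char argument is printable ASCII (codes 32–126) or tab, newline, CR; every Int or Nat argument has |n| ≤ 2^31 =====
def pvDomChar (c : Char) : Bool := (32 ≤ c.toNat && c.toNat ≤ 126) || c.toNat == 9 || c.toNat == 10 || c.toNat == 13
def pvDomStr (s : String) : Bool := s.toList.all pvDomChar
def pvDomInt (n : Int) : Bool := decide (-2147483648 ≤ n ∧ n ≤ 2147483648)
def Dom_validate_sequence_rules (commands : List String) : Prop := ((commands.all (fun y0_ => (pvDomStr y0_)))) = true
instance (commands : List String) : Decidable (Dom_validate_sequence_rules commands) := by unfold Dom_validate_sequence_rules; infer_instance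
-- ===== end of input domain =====

-- B replaces A's stateful consecutive-move counter with an index-jumping scan over maximal
-- runs of move commands (objective: simpler decomposition; same return value).

def pvPlayWarn : String := "play 명령이 준비 자세 없이 생성되었습니다. 현재는 로봇 측 기존 동작에 의존합니다."
def pvMoveWarn : String := "move 명령이 연속으로 길게 이어집니다. 후속 planner 단계에서 wait 삽입을 고려하세요."

-- ===== PORT A =====
-- the for-loop over `commands` with the running counter `consecutive_moves` and early break
def pvALoop : List String → Nat → List String
  | [], _ => []
  | command :: rest, consecutive =>
    let consecutive' :=
      if PySem.Str.startswith command "move:" then consecutive + 1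
      else if PySem.Str.startswith command "wait:" then 0
      else 0
    if 3 ≤ consecutive' then [pvMoveWarn] else pvALoop rest consecutive'

def validate_sequence_rules (commands : List String) : List String :=
  let play_commands := commands.filter (fun cmd => PySem.Str.startswith cmd "p:")
  let warnings : List String :=
    if play_commands ≠ [] ∧ "r" ∉ commands then [pvPlayWarn] else []
  warnings ++ pvALoop commands 0

-- ===== PORT B =====
-- inner while loop: length of the maximal move-run continuing here, and the remainder after it
def pvBRun : List String → Nat × List String
  | [] => (0, [])
  | c :: rest =>
    if PySem.Str.startswith c "move:" then ((pvBRun rest).1 + 1, (pvBRun rest).2)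
    else (0, c :: rest)

theorem pvBRun_len_le : ∀ (l : List String), (pvBRun l).2.length ≤ l.length
  | [] => le_refl _
  | c :: rest => by
    simp only [pvBRun]
    by_cases h : PySem.Str.startswith c "move:" = true
    · rw [if_pos h]; exact Nat.le_succ_of_le (pvBRun_len_le rest)
    · rw [if_neg h]

-- outer while loop: jump over non-moves; at a move, measure the run and either warn or skip it
def pvBScan : List String → List String
  | [] => []
  | c :: rest =>
    if PySem.Str.startswith c "move:" then
      if 3 ≤ (pvBRun rest).1 + 1 then [pvMoveWarn] else pvBScan (pvBRun rest).2
    else pvBScan rest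
  termination_by l => l.length
  decreasing_by
  · exact Nat.lt_succ_of_le (pvBRun_len_le rest)
  · exact Nat.lt_succ_self _

def validate_sequence_rules_alt (commands : List String) : List String :=
  let warnings : List String :=
    if (commands.any fun cmd => PySem.Str.startswith cmd "p:") ∧ "r" ∉ commands
    then [pvPlayWarn] else []
  warnings ++ pvBScan commands

-- ===== PRECONDITION & SPEC =====
def Spec_validate_sequence_rules (commands : List String) (out : List String) : Prop := out = validate_sequence_rules_alt commands
instance (commands : List String) (out : List String) : Decidable (Spec_validate_sequence_rules commands out) := by unfold Spec_validate_sequence_rules; infer_instance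

-- ===== CLAIM (what is proved, stated in full; the proofs are below) =====
def Claim_equal_validate_sequence_rules : Prop := ∀ (commands : List String), Dom_validate_sequence_rules commands → Spec_validate_sequence_rules commands (validate_sequence_rules commands)

-- ===== LEMMAS AND PROOFS =====

theorem pvBScan_char (l : List String) :
    pvBScan l = if 3 ≤ (pvBRun l).1 then [pvMoveWarn] else pvBScan (pvBRun l).2 := by
  cases l with
  | nil => simp [pvBScan, pvBRun]
  | cons c rest =>
    simp only [pvBScan, pvBRun]
    by_cases h : PySem.Str.startswith c "move:" = true
    · rw [if_pos h, if_pos h]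
    · rw [if_neg h, if_neg h]
      show pvBScan rest = if 3 ≤ 0 then [pvMoveWarn] else pvBScan (c :: rest)
      rw [if_neg (by omega)]
      simp only [pvBScan]
      rw [if_neg h]

theorem pvALoop_eq_run : ∀ (l : List String) (j : Nat), j < 3 →
    pvALoop l j = if 3 ≤ (pvBRun l).1 + j then [pvMoveWarn] else pvBScan (pvBRun l).2
  | [], j, hj => by
    simp only [pvALoop, pvBRun, pvBScan]
    rw [if_neg (by omega)]
  | c :: rest, j, hj => by
    simp only [pvALoop, pvBRun]
    by_cases h : PySem.Str.startswith c "move:" = true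
    · rw [if_pos h, if_pos h]
      show (if 3 ≤ j + 1 then [pvMoveWarn] else pvALoop rest (j + 1)) =
        if 3 ≤ (pvBRun rest).1 + 1 + j then [pvMoveWarn] else pvBScan (pvBRun rest).2
      by_cases h3 : 3 ≤ j + 1
      · rw [if_pos h3, if_pos (by omega)]
      · rw [if_neg h3, pvALoop_eq_run rest (j + 1) (by omega)]
        have e : (pvBRun rest).1 + (j + 1) = (pvBRun rest).1 + 1 + j := by omega
        rw [e]
    · rw [if_neg h, if_neg h]
      show (if 3 ≤ (if PySem.Str.startswith c "wait:" = true then 0 else 0) then [pvMoveWarn]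
              else pvALoop rest (if PySem.Str.startswith c "wait:" = true then 0 else 0)) =
        if 3 ≤ 0 + j then [pvMoveWarn] else pvBScan (c :: rest)
      have e : (if PySem.Str.startswith c "wait:" = true then 0 else 0) = 0 := by
        split_ifs <;> rfl
      rw [e, if_neg (by omega), if_neg (by omega), pvALoop_eq_run rest 0 (by omega)]
      rw [Nat.add_zero, ← pvBScan_char]
      simp only [pvBScan]
      rw [if_neg h]

theorem pvALoop_eq_scan (l : List String) : pvALoop l 0 = pvBScan l := by
  rw [pvALoop_eq_run l 0 (by omega), Nat.add_zero, ← pvBScan_char]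

theorem pvFilter_ne_any (l : List String) (p : String → Bool) :
    (l.filter p ≠ [] : Prop) ↔ l.any p = true := by
  simp [List.filter_eq_nil_iff, List.any_eq_true]

-- ===== VERDICT (by name: the statement is the Claim_ definition above) =====
theorem validate_sequence_rules_spec : Claim_equal_validate_sequence_rules := by
  intro commands _
  unfold Spec_validate_sequence_rules validate_sequence_rules validate_sequence_rules_alt
  simp only [pvALoop_eq_scan, pvFilter_ne_any]
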